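-- pv_equiv track=rewrite | github.com/axellbrendow/leetcode | python/optimal-account-balancing.py | create_heaps
-- ===== SOURCE A (Python) =====
-- import heapq
--
-- def create_heaps(graph):
-- 	positive_heap = []
-- 	negative_heap = []
-- 	for node in range(len(graph)):
-- 		coming_out = sum(graph[node])
-- 		coming_in = sum([graph[i][node] for i in range(len(graph))])
-- 		balance = coming_in - coming_out
-- 		if balance > 0:
-- 			heapq.heappush(positive_heap, (balance, node))
-- 		elif balance < 0:
-- 			heapq.heappush(negative_heap, (balance, node))
-- 	return positive_heap, negative_heap
-- ===== SOURCE B (Python) =====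
-- import heapq
-- from collections import defaultdict
--
-- def create_heaps(graph):
--     balance = defaultdict(int)
--     for i, row in enumerate(graph):
--         for j, w in enumerate(row):
--             balance[i] -= w
--             balance[j] += w
--     positive_heap = []
--     negative_heap = []
--     for node in range(len(graph)):
--         b = balance[node]
--         if b > 0:
--             heapq.heappush(positive_heap, (b, node))
--         elif b < 0:
--             heapq.heappush(negative_heap, (b, node))
--     return positive_heap, negative_heap
-- ===== Notes on version B (the rewrite author's own statement) =====
-- stated objective: alternative
-- what changed: Replaces A's per-node pair of scans (row sum plus a freshly built column comprehension per node) with a single pass over all matrix cells accumulating net balances in a defaultdict, followed by a separate push loop in node order; Pre_ excludes exactly the ragged inputs (a row shorter than len(graph)) on which A raises IndexError.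
import Mathlib
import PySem

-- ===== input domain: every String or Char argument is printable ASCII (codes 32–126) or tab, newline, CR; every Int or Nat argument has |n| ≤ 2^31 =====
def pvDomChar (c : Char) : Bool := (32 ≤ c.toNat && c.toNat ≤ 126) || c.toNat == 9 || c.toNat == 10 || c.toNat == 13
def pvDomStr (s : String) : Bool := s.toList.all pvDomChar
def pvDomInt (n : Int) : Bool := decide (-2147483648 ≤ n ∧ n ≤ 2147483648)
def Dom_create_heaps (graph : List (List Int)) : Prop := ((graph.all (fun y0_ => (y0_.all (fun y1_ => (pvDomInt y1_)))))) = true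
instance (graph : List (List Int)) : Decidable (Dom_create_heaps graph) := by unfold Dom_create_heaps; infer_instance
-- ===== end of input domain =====

-- B replaces A's per-node row/column scans with one accumulation pass over the matrix cells
-- into a defaultdict, then pushes in the same node order; same output, different decomposition.


-- ===== PORT A =====
-- shared helper: CPython heapq.heappush on (int, int) tuples (both Pythons call it).
-- tuple '<' comparison
def heapLt (a b : Int × Int) : Bool := a.1 < b.1 || (a.1 == b.1 && a.2 < b.2)

-- heapq._siftdown(heap, 0, pos) with newitem = heap[pos]
def siftdown (heap : List (Int × Int)) (pos : Nat) (newitem : Int × Int) : List (Int × Int) :=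
  if 0 < pos then
    let parentpos := (pos - 1) / 2
    let parent := heap.getD parentpos (0, 0)
    if heapLt newitem parent then
      siftdown (heap.set pos parent) parentpos newitem
    else heap.set pos newitem
  else heap.set pos newitem
termination_by pos
decreasing_by omega

-- heapq.heappush: append item, sift it up from the last position
def heappush (heap : List (Int × Int)) (item : Int × Int) : List (Int × Int) :=
  siftdown (heap ++ [item]) heap.length item

def create_heaps (graph : List (List Int)) : (List (Int × Int)) × (List (Int × Int)) :=
  (List.range graph.length).foldl
    (fun st node =>
      let coming_out := (graph.getD node []).sum
      let coming_in := ((List.range graph.length).map (fun i => (graph.getD i []).getD node 0)).sum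
      let balance := coming_in - coming_out
      if balance > 0 then (heappush st.1 (balance, node), st.2)
      else if balance < 0 then (st.1, heappush st.2 (balance, node))
      else st)
    ([], [])

-- ===== PORT B =====
def create_heaps_alt (graph : List (List Int)) : (List (Int × Int)) × (List (Int × Int)) :=
  let balance :=
    (PySem.List.enumerate graph).foldl
      (fun d p =>
        (PySem.List.enumerate p.2).foldl
          (fun d q =>
            let d := PySem.Dict.modify d p.1 0 (fun v => v - q.2)
            PySem.Dict.modify d q.1 0 (fun v => v + q.2))
          d)
      PySem.Dict.empty
  (List.range graph.length).foldl
    (fun st (node : Nat) =>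
      let b := PySem.Dict.getD balance ((node : Nat) : Int) 0
      if b > 0 then (heappush st.1 (b, node), st.2)
      else if b < 0 then (st.1, heappush st.2 (b, node))
      else st)
    ([], [])

-- ===== PRECONDITION & SPEC =====
-- Pre_ excludes exactly the inputs where A raises IndexError: some row shorter than len(graph).
def Pre_create_heaps (graph : List (List Int)) : Prop :=
  ∀ row ∈ graph, graph.length ≤ row.length
instance (graph : List (List Int)) : Decidable (Pre_create_heaps graph) := by
  unfold Pre_create_heaps; infer_instance

def pvWitness_create_heaps : List (List Int) := [[0, 5], [-3, 0]]

def Spec_create_heaps (graph : List (List Int)) (out : (List (Int × Int)) × (List (Int × Int))) : Prop := out = create_heaps_alt graph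
instance (graph : List (List Int)) (out : (List (Int × Int)) × (List (Int × Int))) : Decidable (Spec_create_heaps graph out) := by unfold Spec_create_heaps; infer_instance

-- ===== CLAIM (what is proved, stated in full; the proofs are below) =====
def Claim_equal_create_heaps : Prop := ∀ (graph : List (List Int)), Dom_create_heaps graph → Pre_create_heaps graph → Spec_create_heaps graph (create_heaps graph)

-- ===== LEMMAS AND PROOFS =====

-- the entry of a row at (Int) column k, 0 if out of range
def entryAt (row : List Int) (k : Int) : Int :=
  if 0 ≤ k ∧ k.toNat < row.length then row.getD k.toNat 0 else 0

-- the inner cell loop: effect on one key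
lemma pairfold (ri : Int) (l : List (Int × Int)) (d : PySem.Dict Int Int) (k : Int) :
    (l.foldl (fun d q =>
        PySem.Dict.modify (PySem.Dict.modify d ri 0 (fun v => v - q.2)) q.1 0 (fun v => v + q.2)) d).getD k 0
    = d.getD k 0 - (if k = ri then (l.map (fun q => q.2)).sum else 0)
      + ((l.filter (fun q => decide (q.1 = k))).map (fun q => q.2)).sum := by
  induction l generalizing d with
  | nil => simp
  | cons q l ih =>
    simp only [List.foldl_cons, List.filter_cons, List.map_cons, List.sum_cons]
    rw [ih]
    simp only [PySem.Dict.getD_modify]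
    split_ifs <;> simp_all <;> omega

-- selecting the single enumerate entry with index k
lemma enumsel {α : Type} (f : α → Int) (dflt : α) (row : List α) (s k : Int) :
    (((PySem.List.enumerate row s).filter (fun q => decide (q.1 = k))).map (fun q => f q.2)).sum
    = if 0 ≤ k - s ∧ (k - s).toNat < row.length then f (row.getD (k - s).toNat dflt) else 0 := by
  induction row generalizing s with
  | nil => simp [PySem.List.enumerate_nil]
  | cons x xs ih =>
    rw [PySem.List.enumerate_cons, List.filter_cons]
    simp only [List.length_cons]
    by_cases hs : s = k
    · subst hs
      rw [if_pos (by simp), List.map_cons, List.sum_cons, ih (s + 1),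
          if_neg (by omega), if_pos (by constructor <;> omega)]
      simp
    · rw [if_neg (by simpa using hs), ih (s + 1)]
      by_cases h : 0 ≤ k - (s + 1) ∧ (k - (s + 1)).toNat < xs.length
      · have hm : (k - s).toNat = (k - (s + 1)).toNat + 1 := by omega
        rw [if_pos h, if_pos (by omega), hm, List.getD_cons_succ]
      · rw [if_neg h, if_neg (by omega)]

-- the inner filter-sum specialised to row entries
lemma enumsel_id (row : List Int) (k : Int) :
    (((PySem.List.enumerate row).filter (fun q => decide (q.1 = k))).map (fun q => q.2)).sum
    = entryAt row k := by
  simpa [entryAt] using enumsel (fun (v : Int) => v) 0 row 0 k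

-- the outer filter-sum: the row whose index is k
lemma enumsel_sum (rows : List (List Int)) (k : Int) :
    (((PySem.List.enumerate rows).filter (fun p => decide (p.1 = k))).map (fun p => p.2.sum)).sum
    = if 0 ≤ k ∧ k.toNat < rows.length then (rows.getD k.toNat []).sum else 0 := by
  simpa using enumsel (fun (r : List Int) => r.sum) [] rows 0 k

lemma enum_entry_map_from (rows : List (List Int)) (k : Int) : ∀ (s : Int),
    (PySem.List.enumerate rows s).map (fun p => entryAt p.2 k) = rows.map (fun r => entryAt r k) := by
  induction rows with
  | nil => intro s; simp [PySem.List.enumerate_nil]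
  | cons a l ihl =>
    intro s
    rw [PySem.List.enumerate_cons, List.map_cons, List.map_cons, ihl]

lemma enum_entry_map (rows : List (List Int)) (k : Int) :
    (PySem.List.enumerate rows).map (fun p => entryAt p.2 k) = rows.map (fun r => entryAt r k) := by
  induction rows generalizing k with
  | nil => simp [PySem.List.enumerate_nil]
  | cons r rows _ =>
    rw [PySem.List.enumerate_cons, List.map_cons, List.map_cons]
    norm_num [enum_entry_map_from rows k 1]

-- the full cell loop: the final balance of one key
lemma outerfold (l : List (Int × List Int)) (d : PySem.Dict Int Int) (k : Int) :
    (l.foldl (fun d p =>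
        (PySem.List.enumerate p.2).foldl
          (fun d q =>
            PySem.Dict.modify (PySem.Dict.modify d p.1 0 (fun v => v - q.2)) q.1 0 (fun v => v + q.2)) d) d).getD k 0
    = d.getD k 0 - ((l.filter (fun p => decide (p.1 = k))).map (fun p => p.2.sum)).sum
      + (l.map (fun p => entryAt p.2 k)).sum := by
  induction l generalizing d with
  | nil => simp
  | cons p l ih =>
    simp only [List.foldl_cons, List.filter_cons, List.map_cons, List.sum_cons]
    rw [ih, pairfold, enumsel_id]
    have hmap : ((PySem.List.enumerate p.2).map (fun q => q.2)).sum = p.2.sum := by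
      rw [PySem.List.map_snd_enumerate]
    rw [hmap]
    by_cases hk : p.1 = k
    · rw [if_pos hk.symm, if_pos (by simp [hk])]
      simp only [List.map_cons, List.sum_cons]
      ring
    · rw [if_neg (fun h => hk h.symm), if_neg (by simp [hk])]
      ring

lemma map_range_getD {α β : Type} (xs : List α) (d : α) (g : α → β) :
    (List.range xs.length).map (fun i => g (xs.getD i d)) = xs.map g := by
  apply List.ext_getElem
  · simp
  · intro i h1 h2
    simp only [List.length_map, List.length_range] at h1
    simp [List.getD_eq_getElem?_getD, List.getElem?_eq_getElem h1]

-- ===== VERDICT (by name: the statements are the Claim_ definitions above) =====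
theorem create_heaps_spec : Claim_equal_create_heaps := by
  intro graph _ hpre
  unfold Spec_create_heaps create_heaps create_heaps_alt
  dsimp only
  apply PySem.List.foldl_congr_mem
  intro st node hnode
  have hn : node < graph.length := List.mem_range.mp hnode
  have hbal : (PySem.Dict.getD
      ((PySem.List.enumerate graph).foldl
        (fun d p =>
          (PySem.List.enumerate p.2).foldl
            (fun d q =>
              PySem.Dict.modify (PySem.Dict.modify d p.1 0 (fun v => v - q.2)) q.1 0 (fun v => v + q.2)) d)
        PySem.Dict.empty) (node : Int) 0)
      = ((List.range graph.length).map (fun i => (graph.getD i []).getD node 0)).sum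
        - (graph.getD node []).sum := by
    rw [outerfold, enumsel_sum, enum_entry_map]
    have hf : (if 0 ≤ (node : Int) ∧ ((node : Int)).toNat < graph.length
        then (graph.getD ((node : Int)).toNat []).sum else 0) = (graph.getD node []).sum := by
      rw [if_pos (by constructor <;> omega)]
      simp
    rw [hf]
    have hent : graph.map (fun r => entryAt r (node : Int)) = graph.map (fun r => r.getD node 0) := by
      apply List.map_congr_left
      intro r hr
      have hlen : graph.length ≤ r.length := hpre r hr
      unfold entryAt
      rw [if_pos (by constructor <;> omega)]
      simp
    rw [hent, ← map_range_getD graph [] (fun r => r.getD node 0)]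
    simp
    omega
  simp only [hbal]
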